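-- pv_equiv track=rewrite | github.com/WenGOt/evve | app.py | split_text_into_topics
-- ===== SOURCE A (Python) =====
-- def split_text_into_topics(text, num_topics):
--     sentences = text.split(".")
--     if len(sentences) == 0:
--         raise ValueError("Текст не содержит предложений.")
--
--     avg_sent_per_topic = max(1, len(sentences) // num_topics)
--     topics = []
--     for i in range(0, len(sentences), avg_sent_per_topic):
--         topic = ". ".join(sentences[i:i + avg_sent_per_topic]).strip()
--         if topic:
--             topics.append(topic)
--
--     return topics
-- ===== SOURCE B (Python) =====
-- def split_text_into_topics(text, num_topics):
--     sentences = text.split(".")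
--     avg_sent_per_topic = max(1, len(sentences) // num_topics)
--     topics = []
--     buf = []
--     for s in sentences:
--         buf.append(s)
--         if len(buf) == avg_sent_per_topic:
--             topic = ". ".join(buf).strip()
--             if topic:
--                 topics.append(topic)
--             buf = []
--     if buf:
--         topic = ". ".join(buf).strip()
--         if topic:
--             topics.append(topic)
--     return topics
-- ===== Notes on version B (the rewrite author's own statement) =====
-- stated objective: alternative
-- what changed: Replaces the stride-indexed range(0, len, avg) loop that slices disjoint windows by a single accumulation pass over the sentences that flushes a buffer each time it reaches avg elements (plus a final flush).
import Mathlib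
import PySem

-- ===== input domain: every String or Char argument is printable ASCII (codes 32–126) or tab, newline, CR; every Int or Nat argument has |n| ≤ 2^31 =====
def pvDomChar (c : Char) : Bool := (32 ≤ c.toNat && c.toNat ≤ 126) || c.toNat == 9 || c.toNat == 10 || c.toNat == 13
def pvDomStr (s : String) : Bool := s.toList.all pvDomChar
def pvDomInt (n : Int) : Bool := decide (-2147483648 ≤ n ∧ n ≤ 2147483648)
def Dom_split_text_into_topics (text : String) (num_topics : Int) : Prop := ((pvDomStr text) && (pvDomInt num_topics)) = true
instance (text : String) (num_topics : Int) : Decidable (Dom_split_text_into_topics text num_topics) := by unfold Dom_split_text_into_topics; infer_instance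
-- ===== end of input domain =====

-- B groups the sentences by a single accumulating pass with a buffer flushed at avg elements,
-- instead of A's stride-indexed range loop over slices; same cost, different decomposition (objective: alternative).

-- ===== PORT A =====
-- text.split("."): the separator "." is non-empty, so PySem.Str.split? is always `some`; the `.getD []` default is never taken.
-- The `if len(sentences) == 0: raise ValueError` guard of A is dead code (str.split always returns ≥ 1 piece) and is not ported.
def split_text_into_topics (text : String) (num_topics : Int) : List String :=
  let sentences := (PySem.Str.split? text ".").getD []
  let avg := max 1 (PySem.Int.floordiv (sentences.length : Int) num_topics)
  (PySem.List.pyRange 0 (sentences.length : Int) avg).foldl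
    (fun topics i =>
      let topic := PySem.Str.strip (PySem.Str.join ". " (PySem.List.slice sentences (some i) (some (i + avg))))
      if topic ≠ "" then topics ++ [topic] else topics) []

-- ===== PORT B =====
def split_text_into_topics_alt (text : String) (num_topics : Int) : List String :=
  let sentences := (PySem.Str.split? text ".").getD []
  let avg := max 1 (PySem.Int.floordiv (sentences.length : Int) num_topics)
  let st := sentences.foldl
    (fun (st : List String × List String) s =>
      let buf := st.2 ++ [s]
      if (buf.length : Int) = avg then
        (let topic := PySem.Str.strip (PySem.Str.join ". " buf)
         if topic ≠ "" then st.1 ++ [topic] else st.1, [])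
      else (st.1, buf)) ([], [])
  if st.2 ≠ [] then
    let topic := PySem.Str.strip (PySem.Str.join ". " st.2)
    if topic ≠ "" then st.1 ++ [topic] else st.1
  else st.1

-- ===== PRECONDITION & SPEC =====
-- Pre_ excludes exactly num_topics = 0, where A raises ZeroDivisionError (len(sentences) // num_topics).
def Pre_split_text_into_topics (text : String) (num_topics : Int) : Prop := num_topics ≠ 0
instance (text : String) (num_topics : Int) : Decidable (Pre_split_text_into_topics text num_topics) := by unfold Pre_split_text_into_topics; infer_instance
def pvWitness_split_text_into_topics : String × Int := ("Hello. World. Bye", 2)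

def Spec_split_text_into_topics (text : String) (num_topics : Int) (out : List String) : Prop := out = split_text_into_topics_alt text num_topics
instance (text : String) (num_topics : Int) (out : List String) : Decidable (Spec_split_text_into_topics text num_topics out) := by unfold Spec_split_text_into_topics; infer_instance

-- ===== CLAIM (what is proved, stated in full; the proofs are below) =====
def Claim_equal_split_text_into_topics : Prop := ∀ (text : String) (num_topics : Int), Dom_split_text_into_topics text num_topics → Pre_split_text_into_topics text num_topics → Spec_split_text_into_topics text num_topics (split_text_into_topics text num_topics)

-- ===== LEMMAS AND PROOFS =====

-- the flush step both loops share: join the chunk with ". ", strip, append if non-empty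
def pvEmit (acc : List String) (buf : List String) : List String :=
  if PySem.Str.strip (PySem.Str.join ". " buf) ≠ "" then
    acc ++ [PySem.Str.strip (PySem.Str.join ". " buf)]
  else acc

-- A's loop body and B's loop body / final flush, as named functions (definitionally equal to the ports' lambdas)
def pvStepA (xs : List String) (s : Int) (topics : List String) (j : Int) : List String :=
  pvEmit topics (PySem.List.slice xs (some j) (some (j + s)))

def pvStepB (s : Int) (st : List String × List String) (x : String) : List String × List String :=
  if ((st.2 ++ [x]).length : Int) = s then (pvEmit st.1 (st.2 ++ [x]), []) else (st.1, st.2 ++ [x])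

def pvFinishB (st : List String × List String) : List String :=
  if st.2 ≠ [] then pvEmit st.1 st.2 else st.1

-- chunk a list into groups of (max a 1) sentences, emitting each group
def pvChunks (a : Nat) (l : List String) (acc : List String) : List String :=
  match l with
  | [] => acc
  | x :: t => pvChunks a ((x :: t).drop (max a 1)) (pvEmit acc ((x :: t).take (max a 1)))
  termination_by l.length
  decreasing_by simp

lemma pvChunks_nil (a : Nat) (acc : List String) : pvChunks a [] acc = acc := by
  rw [pvChunks.eq_def]

lemma pvChunks_cons (a : Nat) (x : String) (t acc : List String) :
    pvChunks a (x :: t) acc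
      = pvChunks a ((x :: t).drop (max a 1)) (pvEmit acc ((x :: t).take (max a 1))) := by
  rw [pvChunks.eq_def]

lemma pvChunks_chunk (a : Nat) (ha : 1 ≤ a) (c r acc : List String)
    (hc : c.length = a) (hne : c ≠ []) :
    pvChunks a (c ++ r) acc = pvChunks a r (pvEmit acc c) := by
  obtain ⟨z, zs, rfl⟩ := List.exists_cons_of_ne_nil hne
  rw [List.cons_append, pvChunks_cons, ← List.cons_append, Nat.max_eq_left ha, ← hc,
      List.take_left, List.drop_left]

lemma pvRange_pos_nil (a b s : Int) (hs : 0 < s) (hab : b ≤ a) :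
    PySem.List.pyRange a b s = [] := by
  simp [PySem.List.pyRange, hs.ne', not_lt.mpr hab, hs]

lemma pvRange_pos_cons (a b s : Int) (hs : 0 < s) (hab : a < b) :
    PySem.List.pyRange a b s = a :: PySem.List.pyRange (a + s) b s := by
  rw [PySem.List.pyRange_of_pos _ _ hs, PySem.List.pyRange_of_pos _ _ hs, if_pos hab]
  have h2 : (b - a + s - 1) / s = (b - a - 1) / s + 1 := by
    have h1 : b - a + s - 1 = (b - a - 1) + 1 * s := by ring
    rw [h1, Int.add_mul_ediv_right _ _ hs.ne']
  have h3 : 0 ≤ (b - a - 1) / s := Int.ediv_nonneg (by omega) hs.le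
  have h4 : ((b - a + s - 1) / s).toNat = ((b - a - 1) / s).toNat + 1 := by omega
  by_cases hb : a + s < b
  · have h5 : b - (a + s) + s - 1 = b - a - 1 := by ring
    rw [if_pos hb, h4, h5, List.range_succ_eq_map, List.map_cons, List.map_map]
    simp only [Nat.cast_zero, mul_zero, add_zero, List.cons.injEq, true_and]
    exact List.map_congr_left (fun k _ => by simp only [Function.comp_apply]; push_cast; ring)
  · have h6 : (b - a - 1) / s = 0 := Int.ediv_eq_zero_of_lt (by omega) (by omega)
    rw [if_neg hb, h4, h6]
    simp

-- A's loop from index i onwards chunks the remaining sentences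
lemma pvA_loop (xs : List String) (s : Int) (a : Nat) (hs : s = (a : Int)) (ha : 1 ≤ a) :
    ∀ (m i : Nat) (acc : List String), xs.length ≤ i + m →
      (PySem.List.pyRange (i : Int) (xs.length : Int) s).foldl (pvStepA xs s) acc
        = pvChunks a (xs.drop i) acc := by
  have hs0 : 0 < s := by rw [hs]; exact_mod_cast ha
  intro m
  induction m with
  | zero =>
    intro i acc h
    rw [pvRange_pos_nil _ _ _ hs0 (by exact_mod_cast (by omega : xs.length ≤ i))]
    rw [List.drop_eq_nil_of_le (by omega), List.foldl_nil, pvChunks_nil]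
  | succ m ih =>
    intro i acc h
    by_cases hi : i < xs.length
    · rw [pvRange_pos_cons _ _ _ hs0 (by exact_mod_cast hi), List.foldl_cons]
      have hcast : (i : Int) + s = ((i + a : Nat) : Int) := by rw [hs]; push_cast; ring
      rw [hcast, ih (i + a) _ (by omega)]
      obtain ⟨x, t, hd⟩ : ∃ x t, xs.drop i = x :: t := by
        cases hxd : xs.drop i with
        | nil => exact absurd (List.drop_eq_nil_iff.mp hxd) (by omega)
        | cons x t => exact ⟨x, t, rfl⟩
      conv_rhs => rw [hd, pvChunks_cons, ← hd]
      rw [Nat.max_eq_left ha, List.drop_drop]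
      have hslice : PySem.List.slice xs (some (i : Int)) (some ((i + a : Nat) : Int))
          = (xs.drop i).take a := by
        rw [← hcast, hs]; exact PySem.List.slice_natCast_add xs i a
      rw [pvStepA, hcast, hslice]
    · rw [pvRange_pos_nil _ _ _ hs0 (by exact_mod_cast (by omega : xs.length ≤ i))]
      rw [List.drop_eq_nil_of_le (by omega), List.foldl_nil, pvChunks_nil]

-- B's loop with pending buffer b chunks b ++ l
lemma pvB_loop (a : Nat) (ha : 1 ≤ a) (s : Int) (hs : s = (a : Int)) :
    ∀ (l acc b : List String), b.length < a →
      pvFinishB (l.foldl (pvStepB s) (acc, b)) = pvChunks a (b ++ l) acc := by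
  intro l
  induction l with
  | nil =>
    intro acc b hb
    rw [List.foldl_nil, List.append_nil]
    by_cases hbe : b = []
    · subst hbe; rw [pvChunks_nil, pvFinishB]; simp
    · obtain ⟨y, t, rfl⟩ := List.exists_cons_of_ne_nil hbe
      rw [pvChunks_cons, Nat.max_eq_left ha,
          List.take_of_length_le (le_of_lt hb), List.drop_eq_nil_of_le (le_of_lt hb),
          pvChunks_nil, pvFinishB, if_pos hbe]
  | cons x rest ih =>
    intro acc b hb
    rw [List.foldl_cons]
    by_cases hfull : b.length + 1 = a
    · have hc : (((b ++ [x]).length : Nat) : Int) = s := by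
        rw [hs]; simp [hfull]
      have hstep : pvStepB s (acc, b) x = (pvEmit acc (b ++ [x]), []) := by
        rw [pvStepB, if_pos hc]
      rw [hstep, ih (pvEmit acc (b ++ [x])) [] (by simp only [List.length_nil]; exact ha),
          List.nil_append]
      have hl : b ++ x :: rest = (b ++ [x]) ++ rest := by simp
      have hlen : (b ++ [x]).length = a := by simp [hfull]
      rw [hl, pvChunks_chunk a ha (b ++ [x]) rest acc hlen (by simp)]
    · have hc : ¬ (((b ++ [x]).length : Nat) : Int) = s := by
        rw [hs]; simp; omega
      have hstep : pvStepB s (acc, b) x = (acc, b ++ [x]) := by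
        rw [pvStepB, if_neg hc]
      rw [hstep, ih acc (b ++ [x]) (by simp; omega), List.append_assoc, List.singleton_append]

-- ===== VERDICT (by name: the statement is the Claim_ definition above) =====
theorem split_text_into_topics_spec : Claim_equal_split_text_into_topics := by
  unfold Claim_equal_split_text_into_topics
  intro text nt _ _
  unfold Spec_split_text_into_topics
  set xs := (PySem.Str.split? text ".").getD [] with hxs
  set av := max 1 (PySem.Int.floordiv ((xs.length : Nat) : Int) nt) with hav
  have h1 : (1 : Int) ≤ av := le_max_left _ _
  have hs : av = ((av.toNat : Nat) : Int) := (Int.toNat_of_nonneg (by omega)).symm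
  have ha1 : 1 ≤ av.toNat := by omega
  have hA : split_text_into_topics text nt = pvChunks av.toNat (xs.drop 0) [] :=
    pvA_loop xs av av.toNat hs ha1 xs.length 0 [] (by omega)
  have hB : split_text_into_topics_alt text nt = pvChunks av.toNat ([] ++ xs) [] :=
    pvB_loop av.toNat ha1 av hs xs [] [] (by simp only [List.length_nil]; exact ha1)
  rw [hA, hB, List.drop_zero, List.nil_append]
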